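-- pv_equiv track=rewrite | github.com/mijikai/euler-python | P023.py | greatest_lower_bound
-- ===== SOURCE A (Python) =====
-- def greatest_lower_bound(lst, num):
--     start = 0
--     end = len(lst) - 1
--     elem = ()
--
--     while start <= end:
--         middle = (end + start) // 2
--         mid_elem = lst[middle]
--         if num < mid_elem:
--             end = middle - 1
--         elif num > mid_elem:
--             elem = (middle, mid_elem)
--             start = middle + 1
--         else:
--             elem = (middle, mid_elem)
--             break
--
--     return elem
-- ===== SOURCE B (Python) =====
-- def greatest_lower_bound(lst, num):
--     def go(sub, offset, best):
--         if not sub: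
--             return best
--         mid = (len(sub) - 1) // 2
--         v = sub[mid]
--         if num < v:
--             return go(sub[:mid], offset, best)
--         if num > v:
--             return go(sub[mid + 1:], offset + mid + 1, (offset + mid, v))
--         return (offset + mid, v)
--     return go(lst, 0, ())
-- ===== Notes on version B (the rewrite author's own statement) =====
-- stated objective: alternative
-- what changed: The iterative index-based binary search over (start, end) is replaced by a recursive divide-and-conquer on list slices that carries an offset and the best candidate found so far.
import Mathlib
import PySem

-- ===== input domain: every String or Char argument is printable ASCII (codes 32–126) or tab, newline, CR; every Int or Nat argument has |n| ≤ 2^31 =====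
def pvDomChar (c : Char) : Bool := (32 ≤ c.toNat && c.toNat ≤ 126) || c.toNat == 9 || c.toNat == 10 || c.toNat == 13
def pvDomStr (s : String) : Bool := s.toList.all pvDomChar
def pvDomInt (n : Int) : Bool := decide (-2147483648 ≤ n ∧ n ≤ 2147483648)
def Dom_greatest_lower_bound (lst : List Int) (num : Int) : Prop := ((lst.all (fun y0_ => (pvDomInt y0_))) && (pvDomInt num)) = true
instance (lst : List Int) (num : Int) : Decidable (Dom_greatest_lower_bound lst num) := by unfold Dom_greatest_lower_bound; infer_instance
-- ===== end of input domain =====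

-- B replaces A's iterative index-based binary search with a recursive divide-and-conquer
-- on list slices carrying an offset and the best candidate so far (objective: alternative).


-- ===== PORT A =====
-- the while loop, state (start, end, elem); the tuple () / (i, v) is the list [] / [i, v]
def glbLoopA (lst : List Int) (num : Int) (start end_ : Int) (elem : List Int) : List Int :=
  if _h : start ≤ end_ then
    let middle := PySem.Int.floordiv (end_ + start) 2
    match PySem.List.pyGet? lst middle with
    | none => elem        -- unreachable in A's runs: middle is always in range there
    | some mid_elem =>
      if num < mid_elem then glbLoopA lst num start (middle - 1) elem
      else if num > mid_elem then glbLoopA lst num (middle + 1) end_ [middle, mid_elem]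
      else [middle, mid_elem]
  else elem
termination_by (end_ - start + 1).toNat
decreasing_by
  · have := PySem.Int.floordiv_two_mid_bounds (lo := start) (hi := end_) (by omega)
    rw [show end_ + start = start + end_ by ring] at *
    omega
  · have := PySem.Int.floordiv_two_mid_bounds (lo := start) (hi := end_) (by omega)
    rw [show end_ + start = start + end_ by ring] at *
    omega

def greatest_lower_bound (lst : List Int) (num : Int) : List Int :=
  glbLoopA lst num 0 (PySem.List.len lst - 1) []

-- ===== PORT B =====
-- recursive helper go(sub, offset, best); sub[:mid] = take, sub[mid+1:] = drop (mid exact: 0 ≤ mid < len sub)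
def glbGoB (num : Int) (sub : List Int) (offset : Int) (best : List Int) : List Int :=
  if _h : sub = [] then best
  else
    let mid : Nat := (sub.length - 1) / 2
    let v : Int := sub.getD mid 0   -- sub[mid], exact: mid < sub.length
    if num < v then glbGoB num (sub.take mid) offset best
    else if num > v then glbGoB num (sub.drop (mid + 1)) (offset + mid + 1) [offset + mid, v]
    else [offset + mid, v]
termination_by sub.length
decreasing_by
  · have : sub.length ≠ 0 := fun h => _h (List.eq_nil_of_length_eq_zero h)
    simp [List.length_take]; omega
  · have : sub.length ≠ 0 := fun h => _h (List.eq_nil_of_length_eq_zero h)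
    simp [List.length_drop]; omega

def greatest_lower_bound_alt (lst : List Int) (num : Int) : List Int :=
  glbGoB num lst 0 []

-- ===== PRECONDITION & SPEC =====
def Spec_greatest_lower_bound (lst : List Int) (num : Int) (out : List Int) : Prop := out = greatest_lower_bound_alt lst num
instance (lst : List Int) (num : Int) (out : List Int) : Decidable (Spec_greatest_lower_bound lst num out) := by unfold Spec_greatest_lower_bound; infer_instance

-- ===== CLAIM (what is proved, stated in full; the proofs are below) =====
def Claim_equal_greatest_lower_bound : Prop := ∀ (lst : List Int) (num : Int), Dom_greatest_lower_bound lst num → Spec_greatest_lower_bound lst num (greatest_lower_bound lst num)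

-- ===== LEMMAS AND PROOFS =====

-- A's loop on the window [start, start + sub.length - 1] equals B's recursion on the slice sub,
-- provided lst agrees with sub on that window.
theorem glb_loop_eq_go (lst : List Int) (num : Int) (sub : List Int) (start : Int)
    (best : List Int) (hs : 0 ≤ start)
    (H : ∀ i : Nat, i < sub.length → PySem.List.pyGet? lst (start + i) = some (sub.getD i 0)) :
    glbLoopA lst num start (start + sub.length - 1) best = glbGoB num sub start best := by
  by_cases hnil : sub = []
  · subst hnil
    rw [glbLoopA, glbGoB]
    simp
  · have hn : 0 < sub.length := List.length_pos_of_ne_nil hnil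
    have hM : (sub.length - 1) / 2 < sub.length := by omega
    have hmidEq : PySem.Int.floordiv (start + (sub.length : Int) - 1 + start) 2
        = start + (((sub.length - 1) / 2 : Nat) : Int) := by
      rw [PySem.Int.floordiv_eq_ediv_of_pos (by norm_num)]
      omega
    rw [glbLoopA, glbGoB, dif_pos (by omega : start ≤ start + (sub.length : Int) - 1),
        dif_neg hnil]
    simp only [hmidEq, H _ hM]
    split_ifs with h1 h2
    · -- num < mid_elem : recurse on the left slice sub.take mid
      have hlen : (sub.take ((sub.length - 1) / 2)).length = (sub.length - 1) / 2 := by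
        simp [List.length_take]; omega
      have := glb_loop_eq_go lst num (sub.take ((sub.length - 1) / 2)) start best hs (by
        intro i hi
        rw [hlen] at hi
        rw [H i (by omega)]
        congr 1
        rw [List.getD_eq_getElem _ _ (by omega), List.getD_eq_getElem _ _ (by rw [hlen]; omega)]
        simp)
      rw [hlen] at this
      exact this
    · -- num > mid_elem : recurse on the right slice sub.drop (mid+1)
      have hlen : (sub.drop ((sub.length - 1) / 2 + 1)).length
          = sub.length - ((sub.length - 1) / 2 + 1) := by simp [List.length_drop]
      have := glb_loop_eq_go lst num (sub.drop ((sub.length - 1) / 2 + 1))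
          (start + (((sub.length - 1) / 2 : Nat) : Int) + 1)
          [start + (((sub.length - 1) / 2 : Nat) : Int), sub.getD ((sub.length - 1) / 2) 0]
          (by omega) (by
        intro i hi
        rw [hlen] at hi
        have hx : start + (((sub.length - 1) / 2 : Nat) : Int) + 1 + (i : Int)
            = start + ((((sub.length - 1) / 2 + 1 + i : Nat)) : Int) := by push_cast; ring
        rw [hx, H _ (by omega)]
        congr 1
        rw [List.getD_eq_getElem _ _ (by omega), List.getD_eq_getElem _ _ (by rw [hlen]; omega)]
        simp)
      rw [hlen] at this
      rw [show start + (((sub.length - 1) / 2 : Nat) : Int) + 1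
            + ((sub.length - ((sub.length - 1) / 2 + 1) : Nat) : Int) - 1
            = start + (sub.length : Int) - 1 by push_cast [Nat.cast_sub (by omega : (sub.length - 1) / 2 + 1 ≤ sub.length)]; ring] at this
      exact this
    · rfl
termination_by sub.length
decreasing_by
  · simp [List.length_take]; omega
  · simp [List.length_drop]; omega

-- ===== VERDICT (by name: the statement is the Claim_ definition above) =====
theorem greatest_lower_bound_spec : Claim_equal_greatest_lower_bound := by
  intro lst num _
  show _ = _
  unfold greatest_lower_bound greatest_lower_bound_alt
  rw [show PySem.List.len lst - 1 = 0 + (lst.length : Int) - 1 by simp [PySem.List.len_eq]]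
  exact glb_loop_eq_go lst num lst 0 [] le_rfl (by
    intro i hi
    simp [PySem.List.pyGet?_natCast, List.getElem?_eq_getElem hi])
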